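-- pv_equiv track=rewrite | github.com/andrzejabramov/Slice | hometasks/homework6/classes.py | valid_metod
-- ===== SOURCE A (Python) =====
-- def valid_metod(lmethod, descript):
--     method_list = []
--     for row in descript:
--         if row == '\n':
--             st = descript.find('\n') + 1
--             descript = descript[st:]
--             en = descript.find(' ')
--             sub_l = descript[:en]
--             if sub_l != '':
--                 method_list.append(sub_l)
--     try:
--         ans = True if method_list.index(lmethod) < 23 else False
--     except Exception:
--         ans = False
--     return ans
-- ===== SOURCE B (Python) =====
-- def valid_metod(lmethod, descript):
--     # Index-based single scan over newline positions using find-with-offset: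
--     # no slicing of the remaining text, tokens are compared in place, and the
--     # scan stops as soon as the answer is decided (match, or 23 tokens seen).
--     n = len(descript)
--     m = len(lmethod)
--     seen = 0
--     j = descript.find('\n')
--     while j != -1 and seen < 23:
--         start = j + 1
--         e = descript.find(' ', start)
--         end = e if e != -1 else n - 1
--         if end > start:
--             if end - start == m and descript.startswith(lmethod, start):
--                 return True
--             seen += 1
--         j = descript.find('\n', start)
--     return False
-- ===== Notes on version B (the rewrite author's own statement) =====
-- stated objective: faster
-- what changed: Replaces A's per-character loop that repeatedly slices the remaining string and its final list.index call with a single index-based scan over newline positions via find-with-offset, comparing candidate tokens in place and stopping early once a match is found or 23 tokens have been seen.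
import Mathlib
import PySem

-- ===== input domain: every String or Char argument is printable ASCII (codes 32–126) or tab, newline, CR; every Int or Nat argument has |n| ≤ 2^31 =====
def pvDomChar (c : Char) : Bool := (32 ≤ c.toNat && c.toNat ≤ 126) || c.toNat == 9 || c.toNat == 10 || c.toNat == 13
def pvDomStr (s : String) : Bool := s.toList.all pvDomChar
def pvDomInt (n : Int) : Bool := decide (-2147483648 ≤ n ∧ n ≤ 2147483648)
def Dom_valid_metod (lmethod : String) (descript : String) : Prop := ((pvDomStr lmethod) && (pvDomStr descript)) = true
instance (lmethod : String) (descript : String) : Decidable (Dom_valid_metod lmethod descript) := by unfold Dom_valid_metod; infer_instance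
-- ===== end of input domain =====

-- B replaces A's slice-and-rescan loop by one index-based scan over newline positions with early exit (objective: faster).

-- ===== PORT A =====
-- A iterates over the ORIGINAL string's characters while reassigning `descript`;
-- `rows` is the fixed iterated character list, `cur` the reassigned string.
def aLoop (rows : List Char) (cur : List Char) (ml : List (List Char)) : List (List Char) :=
  match rows with
  | [] => ml
  | row :: rows =>
    if row = '\n' then
      let st := PySem.Chars.find cur ['\n'] + 1
      let cur' := PySem.List.slice cur (some st) none
      let en := PySem.Chars.find cur' [' ']
      let sub_l := PySem.List.slice cur' none (some en)
      if sub_l ≠ [] then aLoop rows cur' (ml ++ [sub_l])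
      else aLoop rows cur' ml
    else aLoop rows cur ml

def valid_metod (lmethod : String) (descript : String) : Bool :=
  let method_list := aLoop descript.toList descript.toList []
  -- `try: ans = True if method_list.index(lmethod) < 23 else False except: ans = False`
  match PySem.List.index? method_list lmethod.toList with
  | some i => decide (i < 23)
  | none => false

-- ===== PORT B =====
-- the while loop of Source B; `fuel = n + 2` strictly bounds the iteration count
-- (the newline position j strictly increases each round), so fuel never runs out.
def altLoop (s lm : List Char) (n m : Nat) (fuel : Nat) (j : Int) (seen : Nat) : Bool :=
  match fuel with
  | 0 => false
  | fuel + 1 =>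
    if j ≠ -1 ∧ seen < 23 then
      let start := j + 1
      let e := PySem.Chars.findFrom s [' '] start none
      let endi := if e ≠ -1 then e else (n : Int) - 1
      if start < endi then
        -- `descript.startswith(lmethod, start)` ported as startswith on s[start:]
        -- (exact here: 0 ≤ start ≤ len always holds at this call site)
        if endi - start = (m : Int) ∧ PySem.Chars.startswith (PySem.List.slice s (some start) none) lm then true
        else altLoop s lm n m fuel (PySem.Chars.findFrom s ['\n'] start none) (seen + 1)
      else altLoop s lm n m fuel (PySem.Chars.findFrom s ['\n'] start none) seen
    else false

def valid_metod_alt (lmethod : String) (descript : String) : Bool :=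
  let s := descript.toList
  let n := s.length
  let m := lmethod.toList.length
  altLoop s lmethod.toList n m (n + 2) (PySem.Chars.find s ['\n']) 0

-- ===== PRECONDITION & SPEC =====
def Spec_valid_metod (lmethod : String) (descript : String) (out : Bool) : Prop := out = valid_metod_alt lmethod descript
instance (lmethod : String) (descript : String) (out : Bool) : Decidable (Spec_valid_metod lmethod descript out) := by unfold Spec_valid_metod; infer_instance

-- ===== CLAIM (what is proved, stated in full; the proofs are below) =====
def Claim_equal_valid_metod : Prop := ∀ (lmethod : String) (descript : String), Dom_valid_metod lmethod descript → Spec_valid_metod lmethod descript (valid_metod lmethod descript)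

-- ===== LEMMAS AND PROOFS =====

-- the suffix after each '\n' of s, in order
def nlTails (s : List Char) : List (List Char) :=
  match s with
  | [] => []
  | c :: t => if c = '\n' then t :: nlTails t else nlTails t

-- the token A extracts from a tail: up to the first ' ', or all but the last char
def tok (t : List Char) : List Char :=
  PySem.List.slice t none (some (PySem.Chars.find t [' ']))

-- B's traversal of the raw token list with its counter
def scanTok (lm : List Char) (ts : List (List Char)) (seen : Nat) : Bool :=
  match ts with
  | [] => false
  | t :: r =>
    if seen < 23 then
      if t ≠ [] then (if t = lm then true else scanTok lm r (seen + 1))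
      else scanTok lm r seen
    else false

lemma find_singleton_not_mem (c : Char) (cs : List Char) (h : c ∉ cs) :
    PySem.Chars.find cs [c] = -1 := by
  rw [PySem.Chars.find_eq_neg_one_iff]
  rw [List.singleton_infix_iff]; exact h

lemma find_singleton_break (pre rest : List Char) (c : Char) (h : c ∉ pre) :
    PySem.Chars.find (pre ++ c :: rest) [c] = (pre.length : Int) := by
  have hmem : c ∈ pre ++ c :: rest := by simp
  have h0 : 0 ≤ PySem.Chars.find (pre ++ c :: rest) [c] :=
    (PySem.Chars.find_nonneg_iff _ _).2 ((List.singleton_infix_iff c _).2 hmem)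
  obtain ⟨hpre, hmin⟩ := PySem.Chars.find_spec h0
  have hplen : [c] <+: (pre ++ c :: rest).drop pre.length := by
    rw [List.drop_left]; exact ⟨rest, rfl⟩
  have hno : ∀ i, i < pre.length → ¬ [c] <+: (pre ++ c :: rest).drop i := by
    intro i hi hp
    obtain ⟨t, ht⟩ := hp
    have hd : (pre ++ c :: rest).drop i = pre.drop i ++ c :: rest := by
      rw [List.drop_append_of_le_length (le_of_lt hi)]
    rw [hd] at ht
    rcases hq : pre.drop i with _ | ⟨d, ds⟩
    · exact absurd hq (by simp; omega)
    · rw [hq] at ht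
      simp at ht
      exact h (ht.1 ▸ List.mem_of_mem_drop (hq ▸ List.mem_cons_self))
  have : (PySem.Chars.find (pre ++ c :: rest) [c]).toNat = pre.length := by
    by_contra hne
    rcases Nat.lt_or_ge (PySem.Chars.find (pre ++ c :: rest) [c]).toNat pre.length with hlt | hge
    · exact hno _ hlt hpre
    · exact hmin pre.length (by omega) hplen
  omega

lemma break_first (c : Char) (cs : List Char) (h : c ∈ cs) :
    ∃ pre rest, cs = pre ++ c :: rest ∧ c ∉ pre := by
  induction cs with
  | nil => simp at h
  | cons d t ih =>
    by_cases hd : d = c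
    · exact ⟨[], t, by rw [hd]; rfl, by simp⟩
    · have hmem : c ∈ t := by
        rcases List.mem_cons.1 h with h | h
        · exact absurd h.symm hd
        · exact h
      obtain ⟨pre, rest, rfl, hp⟩ := ih hmem
      exact ⟨d :: pre, rest, rfl, by simp [hp, Ne.symm hd]⟩

lemma nlTails_not_mem (cs : List Char) (h : '\n' ∉ cs) : nlTails cs = [] := by
  induction cs with
  | nil => rfl
  | cons d t ih =>
    simp at h
    simp [nlTails, Ne.symm h.1, ih h.2]

lemma nlTails_break (pre rest : List Char) (h : '\n' ∉ pre) :
    nlTails (pre ++ '\n' :: rest) = rest :: nlTails rest := by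
  induction pre with
  | nil => simp [nlTails]
  | cons d t ih =>
    simp at h
    simp [nlTails, Ne.symm h.1, ih h.2]

lemma nlTails_length (cs : List Char) : (nlTails cs).length = cs.count '\n' := by
  induction cs with
  | nil => rfl
  | cons d t ih =>
    by_cases hd : d = '\n'
    · simp [nlTails, hd, ih]
    · simp [nlTails, hd, ih]

lemma cut_break (pre rest : List Char) (h : '\n' ∉ pre) :
    PySem.List.slice (pre ++ '\n' :: rest) (some (PySem.Chars.find (pre ++ '\n' :: rest) ['\n'] + 1)) none = rest := by
  rw [find_singleton_break pre rest '\n' h]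
  have : ((pre.length : Int) + 1) = ((pre.length + 1 : Nat) : Int) := by push_cast; ring
  rw [this, PySem.List.slice_from_natCast]
  have : pre ++ '\n' :: rest = (pre ++ ['\n']) ++ rest := by simp
  rw [this]
  have hl : (pre ++ ['\n']).length = pre.length + 1 := by simp
  rw [← hl, List.drop_left]

lemma aLoop_eq (rows : List Char) (cur : List Char) (ml : List (List Char))
    (h : rows.count '\n' ≤ cur.count '\n') :
    aLoop rows cur ml
      = ml ++ (((nlTails cur).take (rows.count '\n')).map tok).filter (· ≠ []) := by
  induction rows generalizing cur ml with
  | nil => simp [aLoop]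
  | cons row rows ih =>
    by_cases hr : row = '\n'
    · have hcnt : rows.count '\n' + 1 ≤ cur.count '\n' := by
        simpa [hr, List.count_cons] using h
      have hmem : '\n' ∈ cur := List.count_pos_iff.1 (by omega)
      obtain ⟨pre, rest, rfl, hp⟩ := break_first '\n' cur hmem
      have hcut := cut_break pre rest hp
      have hrest : rows.count '\n' ≤ rest.count '\n' := by
        have : (pre ++ '\n' :: rest).count '\n' = rest.count '\n' + 1 := by
          simp [List.count_append, List.count_eq_zero_of_not_mem hp]
        omega
      have hstep : aLoop (row :: rows) (pre ++ '\n' :: rest) ml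
          = if tok rest ≠ [] then aLoop rows rest (ml ++ [tok rest]) else aLoop rows rest ml := by
        simp only [aLoop, hr, if_true]
        rw [hcut]
        rfl
      rw [hstep, nlTails_break pre rest hp]
      have hcount : (row :: rows).count '\n' = rows.count '\n' + 1 := by simp [hr]
      rw [hcount, List.take_succ_cons]
      by_cases ht : tok rest = []
      · simp only [ht, ne_eq, not_true_eq_false, if_false, List.map_cons, List.filter_cons]
        simp [ih rest ml hrest]
      · simp only [ht, ne_eq, not_false_eq_true, if_true, List.map_cons, List.filter_cons]
        simp only [decide_true, if_true]
        rw [ih rest (ml ++ [tok rest]) hrest]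
        simp
    · simp only [aLoop, hr, if_false]
      have hcnt : rows.count '\n' ≤ cur.count '\n' := by
        simp [hr] at h; omega
      rw [ih cur ml hcnt]
      simp [hr]

lemma scanTok_eq (lm : List Char) (ts : List (List Char)) (seen : Nat) (h : seen ≤ 23) :
    scanTok lm ts seen
      = match PySem.List.index? (ts.filter (· ≠ [])) lm with
        | some i => decide (seen + i < 23)
        | none => false := by
  induction ts generalizing seen with
  | nil => simp [scanTok, PySem.List.index?]
  | cons t r ih =>
    by_cases hs : seen < 23
    · by_cases ht : t = []
      · simp only [scanTok, hs, if_true, ht, ne_eq, not_true_eq_false, if_false]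
        rw [ih seen h]
        simp
      · by_cases hlm : t = lm
        · subst hlm
          simp only [scanTok, hs, if_true, ht, ne_eq, not_false_eq_true, if_true]
          rw [List.filter_cons_of_pos (by simpa using ht)]
          rw [PySem.List.index?_cons_self]
          simp [hs]
        · simp only [scanTok, hs, if_true, ht, ne_eq, not_false_eq_true, hlm, if_false, if_true]
          rw [ih (seen + 1) (by omega)]
          rw [List.filter_cons_of_pos (by simpa using ht)]
          rw [PySem.List.index?_cons_of_ne _ hlm]
          rcases PySem.List.index? (r.filter (· ≠ [])) lm with _ | i
          · rfl
          · simp [Option.map_some]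
            omega
    · have hs23 : seen = 23 := by omega
      simp only [scanTok, hs, if_false]
      rcases PySem.List.index? ((t :: r).filter (· ≠ [])) lm with _ | i
      · rfl
      · simp [hs23]

lemma altLoop_eq (s lm : List Char) (fuel k seen : Nat) (hk : k ≤ s.length) (hf : s.length - k + 1 ≤ fuel) :
    altLoop s lm s.length lm.length fuel (PySem.Chars.findFrom s ['\n'] (k : Int) none) seen
      = scanTok lm ((nlTails (s.drop k)).map tok) seen := by
  induction fuel generalizing k seen with
  | zero => omega
  | succ fuel ih =>
    by_cases hmem : '\n' ∈ s.drop k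
    · -- a newline exists at position ≥ k
      obtain ⟨pre, rest, hsplit, hp⟩ := break_first '\n' _ hmem
      have hjr : PySem.Chars.find (s.drop k) ['\n'] = (pre.length : Int) := by
        rw [hsplit]; exact find_singleton_break pre rest '\n' hp
      have hj : PySem.Chars.findFrom s ['\n'] (k : Int) none = ((k + pre.length : Nat) : Int) := by
        rw [PySem.Chars.findFrom_natCast s ['\n'] k hk, hjr]
        have h2 : (pre.length : Int) ≠ -1 := by omega
        rw [if_neg h2]; push_cast; ring
      have hlen : s.length - k = pre.length + 1 + rest.length := by
        have h1 : (s.drop k).length = s.length - k := List.length_drop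
        rw [hsplit] at h1; simp at h1; omega
      have hk' : k + pre.length + 1 ≤ s.length := by omega
      have hrest : s.drop (k + pre.length + 1) = rest := by
        have h1 : s.drop (k + pre.length + 1) = (s.drop k).drop (pre.length + 1) := by
          rw [List.drop_drop]; ring_nf
        rw [h1, hsplit]
        have h2 : pre ++ '\n' :: rest = (pre ++ ['\n']) ++ rest := by simp
        rw [h2]
        have h3 : (pre ++ ['\n']).length = pre.length + 1 := by simp
        rw [← h3, List.drop_left]
      have htails : nlTails (s.drop k) = rest :: nlTails rest := by
        rw [hsplit]; exact nlTails_break pre rest hp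
      have hstart : ((k + pre.length : Nat) : Int) + 1 = ((k + pre.length + 1 : Nat) : Int) := by
        push_cast; ring
      have hne : ((k + pre.length : Nat) : Int) ≠ -1 := by omega
      rw [hj, htails]
      by_cases hs : seen < 23
      case neg =>
        simp only [altLoop]
        rw [if_neg (by tauto)]
        rw [List.map_cons]
        simp only [scanTok]
        rw [if_neg hs]
      case pos =>
        simp only [altLoop]
        rw [if_pos ⟨hne, hs⟩]
        simp only [hstart]
        have hslice : PySem.List.slice s (some ((k + pre.length + 1 : Nat) : Int)) none = rest := by
          rw [PySem.List.slice_from_natCast, hrest]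
        have hfuel' : s.length - (k + pre.length + 1) + 1 ≤ fuel := by omega
        have IH1 := ih (k + pre.length + 1) (seen + 1) hk' hfuel'
        have IH0 := ih (k + pre.length + 1) seen hk' hfuel'
        rw [hrest] at IH1 IH0
        by_cases hsp : ' ' ∈ rest
        · -- a space in the tail: token is everything before it
          obtain ⟨p2, r2, hsplit2, hp2⟩ := break_first ' ' rest hsp
          have her : PySem.Chars.find rest [' '] = (p2.length : Int) := by
            rw [hsplit2]; exact find_singleton_break p2 r2 ' ' hp2
          have he : PySem.Chars.findFrom s [' '] ((k + pre.length + 1 : Nat) : Int) none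
              = ((k + pre.length + 1 + p2.length : Nat) : Int) := by
            rw [PySem.Chars.findFrom_natCast s [' '] _ hk', hrest, her]
            have h3 : (p2.length : Int) ≠ -1 := by omega
            rw [if_neg h3]; push_cast; ring
          have htok : tok rest = p2 := by
            unfold tok
            rw [her]
            rw [PySem.List.slice_to_natCast]
            rw [hsplit2]
            simp
          rw [he]
          have hene : ((k + pre.length + 1 + p2.length : Nat) : Int) ≠ -1 := by omega
          have hene2 : (if ((k + pre.length + 1 + p2.length : Nat) : Int) ≠ -1
              then ((k + pre.length + 1 + p2.length : Nat) : Int) else (s.length : Int) - 1)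
              = ((k + pre.length + 1 + p2.length : Nat) : Int) := if_pos hene
          rw [hene2, List.map_cons]
          simp only [scanTok]
          rw [if_pos hs, htok]
          by_cases hp2e : p2 = []
          · rw [if_neg (by simp [hp2e])]
            rw [if_neg (by simp [hp2e])]
            exact IH0
          · have hp2l : 0 < p2.length := List.length_pos_of_ne_nil hp2e
            rw [if_pos (by push_cast; omega)]
            have hpre : lm <+: rest ↔ lm = rest.take lm.length := List.prefix_iff_eq_take
            by_cases heq : p2 = lm
            · rw [if_pos ⟨by
                have hpl : p2.length = lm.length := by rw [heq]
                push_cast; omega, by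
                rw [PySem.Chars.startswith_iff, hslice, hsplit2, ← heq]
                exact ⟨' ' :: r2, rfl⟩⟩]
              rw [if_pos (by simpa using hp2e), if_pos heq]
            · rw [if_neg (by
                rintro ⟨h1, h2⟩
                rw [PySem.Chars.startswith_iff, hslice] at h2
                have hlml : lm.length = p2.length := by push_cast at h1; omega
                have : lm = rest.take lm.length := hpre.1 h2
                rw [hlml, hsplit2, List.take_left] at this
                exact heq this.symm)]
              rw [if_pos (by simpa using hp2e), if_neg heq]
              exact IH1
        · -- no space after this newline: token is the rest minus its last char
          have her : PySem.Chars.find rest [' '] = -1 := find_singleton_not_mem ' ' rest hsp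
          have he : PySem.Chars.findFrom s [' '] ((k + pre.length + 1 : Nat) : Int) none = -1 := by
            rw [PySem.Chars.findFrom_natCast s [' '] _ hk', hrest, her]; simp
          have htok : tok rest = rest.dropLast := by
            unfold tok; rw [her]; exact PySem.List.slice_to_neg_one rest
          rw [he]
          have hend2 : (if (-1 : Int) ≠ -1 then (-1 : Int) else (s.length : Int) - 1)
              = (s.length : Int) - 1 := by simp
          rw [hend2, List.map_cons]
          simp only [scanTok]
          rw [if_pos hs, htok]
          have hrl : rest.length = s.length - (k + pre.length + 1) := by omega
          by_cases hlen2 : 2 ≤ rest.length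
          · rw [if_pos (by push_cast; omega)]
            have hdl : rest.dropLast = rest.take (rest.length - 1) := by
              rw [List.dropLast_eq_take]
            by_cases heq : rest.dropLast = lm
            · rw [if_pos ⟨by
                  have : lm.length = rest.length - 1 := by rw [← heq]; simp
                  push_cast; omega, by
                  rw [PySem.Chars.startswith_iff, hslice, ← heq]
                  exact List.dropLast_prefix rest⟩]
              rw [if_pos (by
                have : rest.dropLast.length = rest.length - 1 := by simp
                simp only [ne_eq]
                intro hnil
                rw [hnil] at this
                simp at this
                omega), if_pos heq]
            · rw [if_neg (by
                rintro ⟨h1, h2⟩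
                rw [PySem.Chars.startswith_iff, hslice] at h2
                have hlml : lm.length = rest.length - 1 := by push_cast at h1; omega
                have h3 : lm = rest.take lm.length := List.prefix_iff_eq_take.1 h2
                rw [hlml, ← List.dropLast_eq_take] at h3
                exact heq h3.symm)]
              rw [if_pos (by
                simp only [ne_eq]
                intro hnil
                have : rest.dropLast.length = rest.length - 1 := by simp
                rw [hnil] at this
                simp at this
                omega), if_neg heq]
              exact IH1
          · rw [if_neg (by push_cast; omega)]
            rw [if_neg (by
              simp only [ne_eq, not_not]
              rw [List.dropLast_eq_take]
              simp
              omega)]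
            exact IH0
    · have hj : PySem.Chars.findFrom s ['\n'] (k : Int) none = -1 := by
        rw [PySem.Chars.findFrom_natCast s ['\n'] k hk, find_singleton_not_mem _ _ hmem]
        simp
      rw [hj, nlTails_not_mem _ hmem]
      simp [altLoop, scanTok]

-- ===== VERDICT (by name: the statement is the Claim_ definition above) =====
theorem valid_metod_spec : Claim_equal_valid_metod := by
  intro lm d _
  unfold Spec_valid_metod
  have hA : aLoop d.toList d.toList []
      = (((nlTails d.toList).map tok).filter (· ≠ [])) := by
    rw [aLoop_eq _ _ _ (le_refl _)]
    rw [show d.toList.count '\n' = (nlTails d.toList).length from (nlTails_length _).symm]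
    rw [List.take_length]
    simp
  have hB : valid_metod_alt lm d = scanTok lm.toList ((nlTails d.toList).map tok) 0 := by
    show altLoop d.toList lm.toList d.toList.length lm.toList.length (d.toList.length + 2)
        (PySem.Chars.find d.toList ['\n']) 0 = _
    rw [← PySem.Chars.findFrom_zero]
    have h0 : ((0 : Nat) : Int) = (0 : Int) := rfl
    have := altLoop_eq d.toList lm.toList (d.toList.length + 2) 0 0 (by omega) (by omega)
    rw [h0] at this
    simpa using this
  rw [hB, scanTok_eq lm.toList _ 0 (by omega)]
  show (match PySem.List.index? (aLoop d.toList d.toList []) lm.toList with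
        | some i => decide (i < 23)
        | none => false) = _
  rw [hA]
  rcases PySem.List.index? ((((nlTails d.toList).map tok).filter (· ≠ []))) lm.toList with _ | i
  · rfl
  · simp
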